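-- pv_equiv track=rewrite | github.com/SymmetricChaos/NumberTheory | Numerals/Bijective.py | int_to_bijective_list
-- ===== SOURCE A (Python) =====
-- from math import ceil
--
-- def int_to_bijective_list(n,b):
--     S = []
--     q0,q1 = n,0
--     while n > 0:
--         n = ceil(n/b)-1
--         q1 = n
--         S.append(q0-q1*b)
--         q0 = q1
--     S.reverse()
--     return S
-- ===== SOURCE B (Python) =====
-- def int_to_bijective_list(n, b):
--     if n <= 0:
--         return []
--     if b == 1:
--         return [1] * n
--     q, r = divmod(n - 1, b)
--     return int_to_bijective_list(q, b) + [r + 1]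
-- ===== Notes on version B (the rewrite author's own statement) =====
-- stated objective: alternative
-- what changed: Replaced A's iterative append-then-reverse loop with threaded q0/q1 state and ceil arithmetic by a branch-free recursive decomposition using the shifted divmod identity (q, r = divmod(n-1, b); digit r+1), building the list most-significant-first with no reverse and no zero-remainder adjustment, plus the unary closed form [1]*n for base 1.
-- outside the precondition, e.g. on int_to_bijective_list(5, -2): A returns [-1], B returns [1]
import Mathlib
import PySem

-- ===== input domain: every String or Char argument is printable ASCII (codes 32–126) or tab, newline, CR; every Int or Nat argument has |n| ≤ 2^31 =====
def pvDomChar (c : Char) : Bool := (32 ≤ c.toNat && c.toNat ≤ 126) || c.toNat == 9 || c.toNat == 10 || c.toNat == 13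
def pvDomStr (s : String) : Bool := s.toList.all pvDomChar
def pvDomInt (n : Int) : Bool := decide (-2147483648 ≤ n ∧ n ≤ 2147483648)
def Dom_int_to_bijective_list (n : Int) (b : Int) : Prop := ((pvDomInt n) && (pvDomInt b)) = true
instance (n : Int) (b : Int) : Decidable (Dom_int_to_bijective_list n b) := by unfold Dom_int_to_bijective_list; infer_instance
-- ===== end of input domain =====

-- B replaces A's iterative ceil-arithmetic loop (threaded q0/q1 state, append + reverse) by a
-- branch-free recursion on the shifted divmod (q, r = divmod(n-1, b)), building the digits
-- most-significant-first; base 1 uses the unary closed form [1]*n. Objective: alternative.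


-- ===== PORT A =====
-- A's while-loop; fuel n.toNat+1 only totalizes it (each iteration with b ≥ 1 strictly
-- decreases n; with b < 0 the loop ends after one iteration).
-- ceil(n/b) is ported as -((-n) // b), exact for integer n and b ≠ 0.
def pvLoopA (fuel : Nat) (n : Int) (q0 : Int) (q1 : Int) (b : Int) (S : List Int) : List Int :=
  match fuel with
  | 0 => S
  | Nat.succ fuel =>
    if n > 0 then
      let n' := -(PySem.Int.floordiv (-n) b) - 1   -- n = ceil(n/b) - 1
      pvLoopA fuel n' n' n' b (S ++ [q0 - n' * b]) -- q1 = n; S.append(q0 - q1*b); q0 = q1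
    else S

def int_to_bijective_list (n : Int) (b : Int) : List Int :=
  (pvLoopA (n.toNat + 1) n n 0 b []).reverse

-- ===== PORT B =====
-- B's recursion; fuel n.toNat+1 only totalizes it (the recursion argument (n-1)//b
-- strictly decreases below n for b ≥ 1 and drops to ≤ 0 immediately for b < 0).
def pvRecB (fuel : Nat) (n : Int) (b : Int) : List Int :=
  match fuel with
  | 0 => []
  | Nat.succ fuel =>
    if n ≤ 0 then []
    else if b = 1 then List.replicate n.toNat 1    -- [1] * n
    else
      match PySem.Int.divmod? (n - 1) b with
      | none => []                                 -- ZeroDivisionError (b = 0), outside Pre_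
      | some (q, r) => pvRecB fuel q b ++ [r + 1]

def int_to_bijective_list_alt (n : Int) (b : Int) : List Int :=
  pvRecB (n.toNat + 1) n b

-- ===== PRECONDITION & SPEC =====
-- Pre_ excludes non-positive bases (with n > 0): bijective numeration is undefined there —
-- A raises ZeroDivisionError for b = 0, and for b < 0 both programs return arbitrary
-- unspecified values (A e.g. [-1], a non-digit) that no one would specify either way.
def Pre_int_to_bijective_list (n : Int) (b : Int) : Prop := n ≤ 0 ∨ 1 ≤ b
instance (n : Int) (b : Int) : Decidable (Pre_int_to_bijective_list n b) := by unfold Pre_int_to_bijective_list; infer_instance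
def pvWitness_int_to_bijective_list : Int × Int := (10, 3)

def Spec_int_to_bijective_list (n : Int) (b : Int) (out : List Int) : Prop := out = int_to_bijective_list_alt n b
instance (n : Int) (b : Int) (out : List Int) : Decidable (Spec_int_to_bijective_list n b out) := by unfold Spec_int_to_bijective_list; infer_instance

-- ===== CLAIM (what is proved, stated in full; the proofs are below) =====
def Claim_equal_int_to_bijective_list : Prop := ∀ (n : Int) (b : Int), Dom_int_to_bijective_list n b → Pre_int_to_bijective_list n b → Spec_int_to_bijective_list n b (int_to_bijective_list n b)

-- ===== LEMMAS AND PROOFS =====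

-- Quotient bounds for the shifted divmod step (b ≥ 1, n > 0).
lemma q_bounds (n b : Int) (hb : 1 ≤ b) (hn : 0 < n) :
    0 ≤ PySem.Int.floordiv (n - 1) b ∧ PySem.Int.floordiv (n - 1) b ≤ n - 1 := by
  have h := PySem.Int.floordiv_mul_add_mod (n - 1) b
  have h0 := PySem.Int.mod_nonneg (n - 1) (by omega : (0:Int) < b)
  have h1 := PySem.Int.mod_lt (n - 1) (by omega : (0:Int) < b)
  constructor
  · by_contra hq
    push_neg at hq
    nlinarith
  · nlinarith [q_nonneg_aux n b hb hn h h0]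
where
  q_nonneg_aux (n b : Int) (hb : 1 ≤ b) (hn : 0 < n)
      (h : PySem.Int.floordiv (n-1) b * b + PySem.Int.mod (n-1) b = n - 1)
      (h0 : 0 ≤ PySem.Int.mod (n-1) b) : 0 ≤ PySem.Int.floordiv (n-1) b := by
    by_contra hq
    push_neg at hq
    have h1 := PySem.Int.mod_lt (n - 1) (by omega : (0:Int) < b)
    nlinarith

-- A's ceil step equals B's shifted floor division (b ≥ 1).
lemma ceil_shift (n b : Int) (hb : 1 ≤ b) (hn : 0 < n) :
    -(PySem.Int.floordiv (-n) b) - 1 = PySem.Int.floordiv (n - 1) b := by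
  have h := PySem.Int.floordiv_mul_add_mod (n - 1) b
  have h0 := PySem.Int.mod_nonneg (n - 1) (by omega : (0:Int) < b)
  have h1 := PySem.Int.mod_lt (n - 1) (by omega : (0:Int) < b)
  have : -(PySem.Int.floordiv (-n) b) = PySem.Int.floordiv (n - 1) b + 1 := by
    rw [PySem.Int.neg_floordiv_neg_eq_iff_of_pos (by omega)]
    constructor <;> nlinarith
  omega

-- B's recursion is fuel-insensitive once the fuel exceeds n (b ≥ 2).
lemma recB_fuel (b : Int) (hb : 2 ≤ b) :
    ∀ (f f' : Nat) (n : Int), n.toNat < f → n.toNat < f' → pvRecB f n b = pvRecB f' n b := by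
  intro f
  induction f with
  | zero => intro f' n hf _; omega
  | succ f ih =>
    intro f' n hf hf'
    match f', hf' with
    | Nat.succ f', hf' =>
      by_cases hn : n ≤ 0
      · simp [pvRecB, hn]
      · push_neg at hn
        have hb1 : ¬ b = 1 := by omega
        have hdm : PySem.Int.divmod? (n - 1) b =
            some (PySem.Int.floordiv (n - 1) b, PySem.Int.mod (n - 1) b) := by
          simp [PySem.Int.divmod?, PySem.Int.floordiv, PySem.Int.mod]; omega
        have hq := q_bounds n b (by omega) hn
        have hqn : (PySem.Int.floordiv (n - 1) b).toNat < n.toNat := by omega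
        simp only [pvRecB, if_neg (by omega : ¬ n ≤ 0), if_neg hb1, hdm]
        rw [ih f' _ (by omega) (by omega)]

-- A's loop run from state (n, n, q1) appends exactly B's digit string reversed (b ≥ 2).
lemma loopA_ge2 (b : Int) (hb : 2 ≤ b) :
    ∀ (fuel : Nat) (n q1 : Int) (S : List Int), n.toNat < fuel →
      pvLoopA fuel n n q1 b S = S ++ (pvRecB (n.toNat + 1) n b).reverse := by
  intro fuel
  induction fuel with
  | zero => intro n q1 S hf; omega
  | succ fuel ih =>
    intro n q1 S hf
    by_cases hn : n > 0
    · have hdm : PySem.Int.divmod? (n - 1) b =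
          some (PySem.Int.floordiv (n - 1) b, PySem.Int.mod (n - 1) b) := by
        simp [PySem.Int.divmod?, PySem.Int.floordiv, PySem.Int.mod]; omega
      have hq := q_bounds n b (by omega) hn
      have hmod := PySem.Int.floordiv_mul_add_mod (n - 1) b
      have hstep := ceil_shift n b (by omega) hn
      have hqn : (PySem.Int.floordiv (n - 1) b).toNat < n.toNat := by omega
      simp only [pvLoopA, if_pos hn]
      rw [hstep]
      have hdig : n - PySem.Int.floordiv (n - 1) b * b = PySem.Int.mod (n - 1) b + 1 := by
        omega
      rw [hdig, ih _ _ _ (by omega)]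
      have hB : pvRecB (n.toNat + 1) n b =
          pvRecB n.toNat (PySem.Int.floordiv (n - 1) b) b ++ [PySem.Int.mod (n - 1) b + 1] := by
        simp only [pvRecB, if_neg (by omega : ¬ n ≤ 0), if_neg (by omega : ¬ b = 1), hdm]
      rw [hB, recB_fuel b hb n.toNat ((PySem.Int.floordiv (n - 1) b).toNat + 1) _ hqn (by omega)]
      simp
    · have hn0 : n ≤ 0 := by omega
      simp [pvLoopA, pvRecB, hn, hn0]

-- For base 1 the loop appends n ones.
lemma loopA_one :
    ∀ (fuel : Nat) (n q1 : Int) (S : List Int), n.toNat < fuel →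
      pvLoopA fuel n n q1 1 S = S ++ List.replicate n.toNat 1 := by
  intro fuel
  induction fuel with
  | zero => intro n q1 S hf; omega
  | succ fuel ih =>
    intro n q1 S hf
    by_cases hn : n > 0
    · have hfd : PySem.Int.floordiv (-n) 1 = -n := by
        rw [PySem.Int.floordiv_eq_ediv_of_pos (by omega)]; simp
      simp only [pvLoopA, if_pos hn, hfd]
      have h1 : -(-n) - 1 = n - 1 := by ring
      rw [h1, ih _ _ _ (by omega)]
      have h2 : n - (n - 1) * 1 = 1 := by ring
      have h3 : n.toNat = (n - 1).toNat + 1 := by omega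
      rw [h2, h3, List.replicate_succ]
      simp
    · have hn0 : n ≤ 0 := by omega
      simp [pvLoopA, hn]
      omega

-- ===== VERDICT (by name: the statement is the Claim_ definition above) =====
theorem int_to_bijective_list_spec : Claim_equal_int_to_bijective_list := by
  intro n b _ hpre
  unfold Spec_int_to_bijective_list int_to_bijective_list int_to_bijective_list_alt
  by_cases hn : n ≤ 0
  · have h1 : n.toNat + 1 = 1 := by omega
    rw [h1]
    simp [pvLoopA, pvRecB, hn]
  · have hb : 1 ≤ b := hpre.resolve_left hn
    by_cases hb1 : b = 1
    · subst hb1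
      rw [loopA_one _ _ _ _ (by omega)]
      simp only [pvRecB, if_neg (by omega : ¬ n ≤ 0)]
      simp
    · have hb2 : 2 ≤ b := by omega
      rw [loopA_ge2 b hb2 _ _ _ _ (by omega)]
      simp
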